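-- pv_equiv track=rewrite | github.com/cathxrsys/pinescript6-obfuscator | replace_spaces.py | startswithword
-- ===== SOURCE A (Python) =====
-- def startswithword(line: str) -> bool:
--     f = False
--     for i, c in enumerate(line):
--         if (c.isalnum() and not c.isnumeric()) or (c == '_' and i != 0):
--             f = True
--         elif c == ' ' and f:
--             return True
--         else:
--             return False
--     return False
-- ===== SOURCE B (Python) =====
-- def startswithword(line: str) -> bool:
--     idx = line.find(' ')
--     if idx <= 0:
--         return False
--     return all((c.isalnum() and not c.isnumeric()) or (c == '_' and j != 0)
--                for j, c in enumerate(line[:idx]))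
-- ===== Notes on version B (the rewrite author's own statement) =====
-- stated objective: simpler
-- what changed: Replaces the stateful flag-carrying scan with early returns by a locate-the-first-space step (str.find) followed by validating the prefix slice with one all(...) over its characters.
import Mathlib
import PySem

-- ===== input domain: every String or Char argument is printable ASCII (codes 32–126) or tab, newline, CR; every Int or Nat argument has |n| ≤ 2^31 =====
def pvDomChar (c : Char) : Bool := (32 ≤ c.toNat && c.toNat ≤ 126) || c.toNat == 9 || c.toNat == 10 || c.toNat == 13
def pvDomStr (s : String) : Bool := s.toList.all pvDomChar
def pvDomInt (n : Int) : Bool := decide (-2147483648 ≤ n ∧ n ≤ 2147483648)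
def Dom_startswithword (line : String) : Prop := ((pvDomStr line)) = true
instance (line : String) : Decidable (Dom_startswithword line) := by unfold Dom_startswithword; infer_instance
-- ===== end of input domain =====

-- B replaces A's stateful flag-carrying scan by find-first-space then validate the prefix slice (simpler decomposition); same return value on all inputs.

-- ===== PORT A =====
-- the per-character "word character at index i" test, shared verbatim by both ports;
-- on the ASCII domain c.isnumeric() coincides with c.isdigit() (PySem is exact there)
def swWordChar (i : Int) (c : Char) : Bool :=
  (PySem.Chars.isalnum c && !PySem.Chars.isdigit c) || (c == '_' && i != 0)

-- the for-loop of A as structural recursion over enumerate(line), carrying flag f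
def swLoop : List (Int × Char) → Bool → Bool
  | [], _ => false
  | (i, c) :: rest, f =>
    if swWordChar i c then swLoop rest true
    else if c == ' ' && f then true
    else false

def startswithword (line : String) : Bool :=
  swLoop (PySem.List.enumerate line.toList 0) false

-- ===== PORT B =====
def startswithword_alt (line : String) : Bool :=
  let idx := PySem.Str.find line " "
  if idx ≤ 0 then false
  else
    (PySem.List.enumerate (PySem.Str.slice line none (some idx)).toList 0).all
      (fun p => swWordChar p.1 p.2)

-- ===== PRECONDITION & SPEC =====
def Spec_startswithword (line : String) (out : Bool) : Prop := out = startswithword_alt line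
instance (line : String) (out : Bool) : Decidable (Spec_startswithword line out) := by unfold Spec_startswithword; infer_instance

-- ===== CLAIM (what is proved, stated in full; the proofs are below) =====
def Claim_equal_startswithword : Prop := ∀ (line : String), Dom_startswithword line → Spec_startswithword line (startswithword line)

-- ===== LEMMAS AND PROOFS =====

-- a space character is never a word character
theorem swWordChar_space (i : Int) : swWordChar i ' ' = false := by
  simp [swWordChar]
  decide

-- if the line contains no space, A's loop returns false regardless of the flag
theorem swLoop_no_space (cs : List Char) (s : Int) (f : Bool)
    (h : ' ' ∉ cs) : swLoop (PySem.List.enumerate cs s) f = false := by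
  induction cs generalizing s f with
  | nil => simp [PySem.List.enumerate_nil, swLoop]
  | cons c cs ih =>
    rw [PySem.List.enumerate_cons]
    simp only [swLoop]
    have hc : c ≠ ' ' := fun hc => h (hc ▸ List.mem_cons_self)
    split_ifs with h1 h2
    · exact ih (s + 1) true (fun hm => h (List.mem_cons_of_mem _ hm))
    · simp [beq_iff_eq] at h2
      exact absurd h2.1 hc
    · rfl

-- A's loop on pre ++ ' ' :: rest, with no space in pre
theorem swLoop_split (pre rest : List Char) (s : Int) (f : Bool)
    (h : ' ' ∉ pre) :
    swLoop (PySem.List.enumerate (pre ++ ' ' :: rest) s) f =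
      ((PySem.List.enumerate pre s).all (fun p => swWordChar p.1 p.2) && (f || !pre.isEmpty)) := by
  induction pre generalizing s f with
  | nil =>
    rw [List.nil_append, PySem.List.enumerate_cons]
    simp [swLoop, swWordChar_space, PySem.List.enumerate_nil]
  | cons c pre ih =>
    rw [List.cons_append, PySem.List.enumerate_cons, PySem.List.enumerate_cons]
    simp only [swLoop]
    have hc : c ≠ ' ' := fun hc => h (hc ▸ List.mem_cons_self)
    split_ifs with h1 h2
    · rw [ih (s + 1) true (fun hm => h (List.mem_cons_of_mem _ hm))]
      simp [h1]
    · simp [beq_iff_eq] at h2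
      exact absurd h2.1 hc
    · simp [List.all_cons, h1]

-- a singleton list is an infix exactly when its element occurs
theorem singleton_infix_iff (c : Char) (cs : List Char) : [c] <:+: cs ↔ c ∈ cs := by
  constructor
  · intro ⟨p, q, hpq⟩
    exact hpq ▸ (by simp)
  · intro hm
    obtain ⟨p, q, hpq⟩ := List.append_of_mem hm
    exact ⟨p, q, by simp [hpq]⟩

theorem startswithword_eq_alt (line : String) :
    startswithword line = startswithword_alt line := by
  unfold startswithword startswithword_alt
  simp only [PySem.Str.find_eq, show (" " : String).toList = [' '] from rfl]
  set cs := line.toList with hcs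
  by_cases hmem : ' ' ∈ cs
  · -- there is a space; find points at the first one
    have hfind0 : 0 ≤ PySem.Chars.find cs [' '] :=
      (PySem.Chars.find_nonneg_iff cs [' ']).mpr ((singleton_infix_iff ' ' cs).mpr hmem)
    obtain ⟨hpref, hmin⟩ := PySem.Chars.find_spec hfind0
    set k : Nat := (PySem.Chars.find cs [' ']).toNat with hk
    have hks : cs.drop k = ' ' :: cs.drop (k + 1) := by
      obtain ⟨t, ht⟩ := hpref
      have hdk : cs.drop k = ' ' :: t := by simpa using ht.symm
      have : cs.drop (k + 1) = t := by
        rw [← List.drop_drop, hdk]; simp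
      rw [hdk, this]
    have hklen : k < cs.length := by
      by_contra hlt
      rw [List.drop_eq_nil_of_le (by omega)] at hks
      exact List.cons_ne_nil _ _ hks.symm
    have hnotpre : ' ' ∉ cs.take k := by
      intro hm
      obtain ⟨i, hi, hig⟩ := List.mem_iff_getElem.mp hm
      have hik : i < k := by simp [List.length_take] at hi; omega
      apply hmin i hik
      refine ⟨cs.drop (i + 1), ?_⟩
      have hci : cs[i]'(by omega) = ' ' := by rw [← List.getElem_take (h := hi)]; exact hig
      rw [← List.getElem_cons_drop (as := cs) (i := i) (by omega), hci]
      rfl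
    have hdecomp : cs = cs.take k ++ ' ' :: cs.drop (k + 1) := by
      conv_lhs => rw [← List.take_append_drop k cs]
      rw [hks]
    rcases Nat.eq_zero_or_pos k with hk0 | hkpos
    · -- the first character is a space: both sides are false
      rw [if_pos (by omega)]
      conv_lhs => rw [hdecomp, hk0]
      rw [List.take_zero, List.nil_append, PySem.List.enumerate_cons]
      simp [swLoop, swWordChar_space]
    · -- k ≥ 1: A walks the prefix then hits the space; B validates the slice
      rw [if_neg (by omega)]
      rw [PySem.Str.toList_slice, ← hcs]
      have hsl : PySem.Chars.slice cs none (some (PySem.Chars.find cs [' '])) = cs.take k := by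
        show PySem.List.slice cs none (some (PySem.Chars.find cs [' '])) = cs.take k
        rw [PySem.List.slice_to cs hfind0]
      rw [hsl]
      conv_lhs => rw [hdecomp]
      rw [swLoop_split _ _ 0 false hnotpre]
      have hne : cs.take k ≠ [] := by
        intro h0
        rcases List.take_eq_nil_iff.mp h0 with h | h
        · omega
        · rw [h] at hklen
          simp at hklen
      simp [hne]
  · -- no space anywhere: find = -1, both sides are false
    have hfind : PySem.Chars.find cs [' '] = -1 :=
      (PySem.Chars.find_eq_neg_one_iff cs [' ']).mpr
        (fun h => hmem ((singleton_infix_iff ' ' cs).mp h))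
    rw [hfind, if_pos (by omega)]
    exact swLoop_no_space cs 0 false hmem

-- ===== VERDICT (by name: the statement is the Claim_ definition above) =====
theorem startswithword_spec : Claim_equal_startswithword := by
  intro line _
  exact startswithword_eq_alt line
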